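-- pv_equiv track=rewrite | github.com/joravery/adventOfCode2022 | day_08/puzzle_02/solution.py | get_left_visibility
-- ===== SOURCE A (Python) =====
-- def get_left_visibility(y: int, x: int, tree_map: list):
--     left_visibility = 0
--     for i in range(x-1, -1, -1):
--         if tree_map[y][i] >= tree_map[y][x]:
--             return left_visibility + 1
--         else:
--             left_visibility += 1
--     return left_visibility
-- ===== SOURCE B (Python) =====
-- def get_left_visibility(y: int, x: int, tree_map: list):
--     if x <= 0:
--         return 0  # no trees to the left
--     row = tree_map[y]
--     h = row[x]
--     blockers = [i for i in range(x) if row[i] >= h]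
--     return x - max(blockers) if blockers else x
-- ===== Notes on version B (the rewrite author's own statement) =====
-- stated objective: alternative
-- what changed: Replaces A's early-terminating right-to-left counting loop with a full left-prefix scan that collects all blocker indices and derives the distance in closed form as x - max(blockers) (or x when there is none).
import Mathlib
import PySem

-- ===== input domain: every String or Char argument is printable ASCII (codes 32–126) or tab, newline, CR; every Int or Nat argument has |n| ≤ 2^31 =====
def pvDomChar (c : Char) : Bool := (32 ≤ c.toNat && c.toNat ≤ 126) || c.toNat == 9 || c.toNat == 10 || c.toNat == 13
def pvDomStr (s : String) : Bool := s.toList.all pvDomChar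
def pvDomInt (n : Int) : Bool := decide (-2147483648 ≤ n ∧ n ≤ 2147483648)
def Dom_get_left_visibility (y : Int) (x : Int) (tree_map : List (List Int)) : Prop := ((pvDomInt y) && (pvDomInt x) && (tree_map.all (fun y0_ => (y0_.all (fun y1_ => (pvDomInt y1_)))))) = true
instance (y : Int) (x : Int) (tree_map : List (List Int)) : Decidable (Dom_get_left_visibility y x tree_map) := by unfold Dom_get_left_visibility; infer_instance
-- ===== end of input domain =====

-- ===== PORT A =====
-- A: counts trees right-to-left from x-1, returning the count (inclusive) at the first tree of height >= tree_map[y][x].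
def glvLoopA (y : Int) (x : Int) (tree_map : List (List Int)) : List Int → Int → Int
  | [], acc => acc
  | i :: rest, acc =>
      if PySem.List.pyGetD (PySem.List.pyGetD tree_map y []) x 0 ≤
         PySem.List.pyGetD (PySem.List.pyGetD tree_map y []) i 0 then
        acc + 1
      else
        glvLoopA y x tree_map rest (acc + 1)

def get_left_visibility (y : Int) (x : Int) (tree_map : List (List Int)) : Int :=
  glvLoopA y x tree_map (PySem.List.pyRange (x - 1) (-1) (-1)) 0

-- ===== PORT B =====
-- B: collects all blocker indices in the left prefix and returns x - max(blockers), or x if none.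
def get_left_visibility_alt (y : Int) (x : Int) (tree_map : List (List Int)) : Int :=
  if x ≤ 0 then 0  -- no trees to the left
  else
  let row := PySem.List.pyGetD tree_map y []
  let h := PySem.List.pyGetD row x 0
  let blockers := (PySem.List.pyRange 0 x 1).filter (fun i => decide (h ≤ PySem.List.pyGetD row i 0))
  match PySem.List.max? blockers (fun v => v) with
  | some m => x - m
  | none => x

-- ===== PRECONDITION & SPEC =====
-- Pre_ excludes exactly the inputs on which A raises IndexError: x >= 1 with y outside Python's wrap range
-- for tree_map or x outside the selected row (the loop body then evaluates tree_map[y][x] and raises).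
def Pre_get_left_visibility (y : Int) (x : Int) (tree_map : List (List Int)) : Prop :=
  x ≤ 0 ∨ (PySem.Raise.InRange tree_map.length y ∧
    x < (PySem.List.pyGetD tree_map y []).length)

instance (y : Int) (x : Int) (tree_map : List (List Int)) : Decidable (Pre_get_left_visibility y x tree_map) := by unfold Pre_get_left_visibility; infer_instance

def pvWitness_get_left_visibility : Int × Int × List (List Int) := (0, 2, [[3, 1, 2, 4]])

def Spec_get_left_visibility (y : Int) (x : Int) (tree_map : List (List Int)) (out : Int) : Prop := out = get_left_visibility_alt y x tree_map
instance (y : Int) (x : Int) (tree_map : List (List Int)) (out : Int) : Decidable (Spec_get_left_visibility y x tree_map out) := by unfold Spec_get_left_visibility; infer_instance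

-- ===== CLAIM (what is proved, stated in full; the proofs are below) =====
def Claim_equal_get_left_visibility : Prop := ∀ (y : Int) (x : Int) (tree_map : List (List Int)), Dom_get_left_visibility y x tree_map → Pre_get_left_visibility y x tree_map → Spec_get_left_visibility y x tree_map (get_left_visibility y x tree_map)

-- ===== LEMMAS AND PROOFS =====

-- shifting the accumulator out of A's loop
theorem glvLoopA_acc (y x : Int) (tm : List (List Int)) (l : List Int) (acc : Int) :
    glvLoopA y x tm l acc = acc + glvLoopA y x tm l 0 := by
  induction l generalizing acc with
  | nil => simp [glvLoopA]
  | cons i rest ih =>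
      simp only [glvLoopA]
      split_ifs with h
      · ring
      · rw [ih (acc + 1), ih (0 + 1)]; ring

-- Python max of a snoc list whose earlier elements are strictly smaller
theorem max?_append_singleton_of_lt (ys : List Int) (z : Int)
    (h : ∀ y ∈ ys, y < z) :
    PySem.List.max? (ys ++ [z]) (fun v => v) = some z := by
  induction ys with
  | nil => simp [PySem.List.max?]
  | cons a t ih =>
      have hfold : ∀ (t : List Int) (a : Int), a < z → (∀ y ∈ t, y < z) → t.foldl max a < z := by
        intro t
        induction t with
        | nil => intro a ha _; simpa using ha
        | cons b u ihu =>
            intro a ha hm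
            simp only [List.foldl_cons]
            exact ihu (max a b) (max_lt ha (hm b (by simp))) (fun y hy => hm y (by simp [hy]))
      rw [List.cons_append, PySem.List.max?_id_cons, List.foldl_append]
      simp only [List.foldl_cons, List.foldl_nil]
      have : t.foldl max a < z :=
        hfold t a (h a (by simp)) (fun y hy => h y (by simp [hy]))
      rw [max_eq_right this.le]

-- the core induction: A's reversed scan equals B's closed form, over range 0..n
theorem glv_core (y x : Int) (tm : List (List Int)) (n : Nat) :
    glvLoopA y x tm (PySem.List.pyRange 0 (n : Int) 1).reverse 0 =
      (match PySem.List.max?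
          ((PySem.List.pyRange 0 (n : Int) 1).filter
            (fun i => decide (PySem.List.pyGetD (PySem.List.pyGetD tm y []) x 0 ≤
                              PySem.List.pyGetD (PySem.List.pyGetD tm y []) i 0)))
          (fun v => v) with
        | some m => (n : Int) - m
        | none => (n : Int)) := by
  induction n with
  | zero => simp [PySem.List.pyRange_one_eq_nil (by omega : (0:Int) ≤ 0), glvLoopA, PySem.List.max?]
  | succ n ih =>
      have hcast : ((n + 1 : Nat) : Int) = (n : Int) + 1 := by push_cast; ring
      rw [hcast, PySem.List.pyRange_one_succ_right (by positivity : (0:Int) ≤ (n:Int)),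
        List.reverse_append]
      simp only [List.reverse_cons, List.reverse_nil, List.nil_append, List.cons_append,
        List.filter_append, glvLoopA, List.filter_cons, List.filter_nil, decide_eq_true_eq]
      by_cases hp : PySem.List.pyGetD (PySem.List.pyGetD tm y []) x 0 ≤
          PySem.List.pyGetD (PySem.List.pyGetD tm y []) (n : Int) 0
      · rw [if_pos hp]
        rw [if_pos hp]
        rw [max?_append_singleton_of_lt _ _ (by
          intro z hz
          have := PySem.List.mem_pyRange_one.mp (List.mem_of_mem_filter hz)
          omega)]
        ring
      · rw [if_neg hp]
        simp only [hp, if_false, List.append_nil]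
        rw [glvLoopA_acc]
        rw [ih]
        cases hmx : PySem.List.max?
            ((PySem.List.pyRange 0 (n : Int) 1).filter
              (fun i => decide (PySem.List.pyGetD (PySem.List.pyGetD tm y []) x 0 ≤
                                PySem.List.pyGetD (PySem.List.pyGetD tm y []) i 0)))
            (fun v => v) with
        | none => ring
        | some m => ring_nf

-- ===== VERDICT (by name: the statement is the Claim_ definition above) =====
theorem get_left_visibility_spec : Claim_equal_get_left_visibility := by
  intro y x tree_map _ hpre
  unfold Spec_get_left_visibility get_left_visibility get_left_visibility_alt
  by_cases hx0 : x ≤ 0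
  · rw [if_pos hx0, PySem.List.pyRange_neg_one_eq_nil (by omega : x - 1 ≤ -1)]
    rfl
  · rw [if_neg hx0]
    have hx0 : 0 ≤ x := by omega
    have hrange : PySem.List.pyRange (x - 1) (-1) (-1) =
      (PySem.List.pyRange 0 x 1).reverse := by
      rw [PySem.List.pyRange_neg_one_eq_reverse]
      norm_num
    rw [hrange]
    obtain ⟨n, rfl⟩ : ∃ n : Nat, x = (n : Int) := ⟨x.toNat, (Int.toNat_of_nonneg hx0).symm⟩
    exact glv_core y (n : Int) tree_map n
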